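-- pv_equiv track=rewrite | github.com/GNOME/orca | src/orca/gnomespeechfactory.py | _matchLanguage
-- ===== SOURCE A (Python) =====
-- def _matchLanguage(desired, actual):
--     """Compares a desired language to an actual language and returns
--     a numerical value representing the degree of match.  The expected
--     language format is a string similar to the following, where the
--     delimiter can be '-' '_' or '.':
--
--       de-DE (German for Germany)
--       en-US (English as used in the United States)
--
--     Additional extensions for variants or dialects are allowed as well.
--
--     The return value is one of the following:
--
--       0 - no match at all
--       1 - some match
--       2 - exact match
--     """
--
--     if desired == actual:
--         return 2
--     if not desired or not actual:
--         return 0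
--
--     # Break the strings into arrays where the delimiters are
--     # - or _.  Also lowercase everything to help with string
--     # compares.
--     #
--     desired = desired.lower().replace("-","_").replace(".","_").split("_")
--     actual = actual.lower().replace("-","_").replace(".","_").split("_")
--
--     matchCount = 0
--     for i in range(0, min(len(desired), len(actual))):
--         if desired[i] == actual[i]:
--             matchCount += 1
--         else:
--             break
--
--     if matchCount == len(desired):
--         return 2
--     elif matchCount:
--         return 1
--     else:
--         return 0
-- ===== SOURCE B (Python) =====
-- def _matchLanguage(desired, actual):
--     if desired == actual:
--         return 2
--     if not desired or not actual:
--         return 0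
--     # Flat-string comparison with a '_' sentinel appended: no splitting into
--     # component lists, no counting loop.
--     d = desired.lower().replace("-", "_").replace(".", "_") + "_"
--     a = actual.lower().replace("-", "_").replace(".", "_") + "_"
--     if a.startswith(d):
--         return 2
--     if a.startswith(d[:d.index("_") + 1]):
--         return 1
--     return 0
-- ===== Notes on version B (the rewrite author's own statement) =====
-- stated objective: simpler
-- what changed: B never splits the strings into component lists and has no counting loop: it appends a '_' sentinel to both normalized flat strings and decides with two startswith tests (full-string prefix gives 2, first-token prefix via index of the first '_' gives 1)
import Mathlib
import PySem

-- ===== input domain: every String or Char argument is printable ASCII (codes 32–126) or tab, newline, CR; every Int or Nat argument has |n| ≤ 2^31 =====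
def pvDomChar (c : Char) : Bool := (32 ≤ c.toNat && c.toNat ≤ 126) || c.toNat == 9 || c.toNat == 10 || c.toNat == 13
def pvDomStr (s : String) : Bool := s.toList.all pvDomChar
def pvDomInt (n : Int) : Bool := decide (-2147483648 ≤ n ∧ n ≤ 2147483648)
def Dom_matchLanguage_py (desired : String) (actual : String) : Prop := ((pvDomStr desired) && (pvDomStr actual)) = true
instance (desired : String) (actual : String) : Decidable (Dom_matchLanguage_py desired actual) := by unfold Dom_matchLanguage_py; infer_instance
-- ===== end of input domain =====

-- B drops the split into component lists and the counting loop entirely: it appends a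
-- '_' sentinel to both normalized flat strings and decides with two startswith tests;
-- objective: simpler (same cost).

-- ===== PORT A =====
-- shared normalization: s.lower().replace("-","_").replace(".","_")
def pvNormCore (s : String) : List Char :=
  PySem.Chars.replace (PySem.Chars.replace (PySem.Chars.lower s.toList) ['-'] ['_']) ['.'] ['_']

-- A's '….split("_")'
def pvNorm (s : String) : List (List Char) :=
  PySem.Chars.splitOn (pvNormCore s) ['_']

-- A's 'for i in range(0, min(len(desired), len(actual)))' with break, as the
-- structural recursion over the two lists (it stops at the shorter one or at the
-- first mismatch, exactly like the break)
def pvCountLoop : List (List Char) → List (List Char) → Nat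
  | x :: xs, y :: ys => if x == y then pvCountLoop xs ys + 1 else 0
  | _, _ => 0

def matchLanguage_py (desired : String) (actual : String) : Int :=
  if desired == actual then 2
  else if desired == "" || actual == "" then 0
  else
    let d := pvNorm desired
    let a := pvNorm actual
    let matchCount := pvCountLoop d a
    if matchCount == d.length then 2
    else if matchCount != 0 then 1
    else 0

-- ===== PORT B =====
-- Source B's normalized string with the appended '_' sentinel
def pvNormS (s : String) : List Char := pvNormCore s ++ ['_']

def matchLanguage_py_alt (desired : String) (actual : String) : Int :=
  if desired == actual then 2
  else if desired == "" || actual == "" then 0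
  else
    let d := pvNormS desired
    let a := pvNormS actual
    if PySem.Chars.startswith a d then 2                 -- a.startswith(d)
    -- a.startswith(d[:d.index("_") + 1]); d always contains '_' (the sentinel), so
    -- Python's .index never raises and equals find here
    else if PySem.Chars.startswith a
        (PySem.Chars.slice d none (some (PySem.Chars.find d ['_'] + 1))) then 1
    else 0

-- ===== PRECONDITION & SPEC =====
def Spec_matchLanguage_py (desired : String) (actual : String) (out : Int) : Prop := out = matchLanguage_py_alt desired actual
instance (desired : String) (actual : String) (out : Int) : Decidable (Spec_matchLanguage_py desired actual out) := by unfold Spec_matchLanguage_py; infer_instance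

-- ===== CLAIM (what is proved, stated in full; the proofs are below) =====
def Claim_equal_matchLanguage_py : Prop := ∀ (desired : String) (actual : String), Dom_matchLanguage_py desired actual → Spec_matchLanguage_py desired actual (matchLanguage_py desired actual)

-- ===== LEMMAS AND PROOFS =====

-- a direct structural recursion computing Chars.splitOn · ['_']
def pvSp : List Char → List (List Char)
  | [] => [[]]
  | c :: rest => if c = '_' then [] :: pvSp rest
                 else ((c :: (pvSp rest).headI) :: (pvSp rest).tail)

lemma pvSp_ne_nil (l : List Char) : pvSp l ≠ [] := by
  cases l with
  | nil => simp [pvSp]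
  | cons c rest => by_cases h : c = '_' <;> simp [pvSp, h]

lemma pvGo_eq (fuel : Nat) (l cur : List Char) (acc : List (List Char)) (h : l.length < fuel) :
    PySem.Chars.splitOn.go ['_'] fuel l cur acc
      = acc.reverse ++ (cur.reverse ++ (pvSp l).headI) :: (pvSp l).tail := by
  induction fuel generalizing l cur acc with
  | zero => omega
  | succ n ih =>
    cases l with
    | nil => simp [PySem.Chars.splitOn.go, pvSp]
    | cons c rest =>
      by_cases hc : c = '_'
      · subst hc
        rw [show PySem.Chars.splitOn.go ['_'] (n+1) ('_' :: rest) cur acc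
            = PySem.Chars.splitOn.go ['_'] n rest [] (cur.reverse :: acc) from by
          simp [PySem.Chars.splitOn.go, List.isPrefixOf]]
        rw [ih rest [] _ (by simpa using Nat.lt_of_succ_lt_succ h)]
        rcases hn : pvSp rest with _ | ⟨x, xs⟩
        · exact absurd hn (pvSp_ne_nil rest)
        · simp [pvSp, hn]
      · rw [show PySem.Chars.splitOn.go ['_'] (n+1) (c :: rest) cur acc
            = PySem.Chars.splitOn.go ['_'] n rest (c :: cur) acc from by
          simp [PySem.Chars.splitOn.go, List.isPrefixOf, Ne.symm hc]]
        rw [ih rest (c :: cur) acc (by simpa using Nat.lt_of_succ_lt_succ h)]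
        simp [pvSp, hc]

lemma pvSplitOn_eq (l : List Char) : PySem.Chars.splitOn l ['_'] = pvSp l := by
  rw [PySem.Chars.splitOn, pvGo_eq _ _ _ _ (by omega)]
  cases h : pvSp l with
  | nil => exact absurd h (pvSp_ne_nil l)
  | cons x xs => simp

-- A's loop outcome as the take/head tests on the split lists
lemma pvCountLoop_eq_len (d a : List (List Char)) :
    pvCountLoop d a = d.length ↔ List.take d.length a = d := by
  induction d generalizing a with
  | nil => simp [pvCountLoop]
  | cons x xs ih =>
    cases a with
    | nil => simp [pvCountLoop]
    | cons y ys =>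
      by_cases h : x = y
      · subst h
        simp [pvCountLoop, ih ys]
      · simp [pvCountLoop, h, Ne.symm h]

lemma pvKey (d a : List (List Char)) :
    (if pvCountLoop d a == d.length then (2 : Int)
     else if pvCountLoop d a != 0 then 1 else 0)
    = (if List.take d.length a == d then (2 : Int)
       else if d.head? == a.head? then 1 else 0) := by
  cases d with
  | nil => simp [pvCountLoop]
  | cons x xs =>
    cases a with
    | nil => simp [pvCountLoop]
    | cons y ys =>
      by_cases h : x = y
      · subst h
        have hc := pvCountLoop_eq_len xs ys
        by_cases hh : List.take xs.length ys = xs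
        · simp [pvCountLoop, hc.mpr hh, hh]
        · have hne : pvCountLoop xs ys ≠ xs.length := fun h' => hh (hc.mp h')
          simp [pvCountLoop, hne, hh]
      · simp [pvCountLoop, h, Ne.symm h]

-- first component of the split = takeWhile before the first '_'
lemma pvSp_headI (l : List Char) : (pvSp l).headI = l.takeWhile (fun c => c != '_') := by
  induction l with
  | nil => simp [pvSp]
  | cons c rest ih =>
    by_cases h : c = '_'
    · simp [pvSp, h]
    · simp [pvSp, h, ih]

-- the 2-test: the split list is a component prefix iff the sentinel strings are prefixes
lemma pvTake_sp_iff (nd na : List Char) :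
    List.take (pvSp nd).length (pvSp na) = pvSp nd ↔ (nd ++ ['_']) <+: (na ++ ['_']) := by
  induction nd generalizing na with
  | nil =>
    cases na with
    | nil => simp [pvSp]
    | cons c2 rest =>
      by_cases h2 : c2 = '_'
      · subst h2; simp [pvSp]
      · simp [pvSp, h2, List.cons_prefix_cons, Ne.symm h2]
  | cons c nd' ih =>
    by_cases h : c = '_'
    · subst h
      cases na with
      | nil =>
        constructor
        · intro hx; exfalso
          simp [pvSp] at hx
          exact pvSp_ne_nil nd' hx
        · intro hx; exfalso
          have := hx.length_le
          simp at this
      | cons c2 rest =>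
        by_cases h2 : c2 = '_'
        · subst h2
          simp [pvSp, List.cons_prefix_cons]
          exact ih rest
        · constructor
          · intro hx; exfalso
            rcases hsp : pvSp rest with _ | ⟨x, xs⟩
            · exact absurd hsp (pvSp_ne_nil rest)
            · simp [pvSp, h2, hsp] at hx
          · intro hx; exfalso
            rw [List.cons_append, List.cons_append, List.cons_prefix_cons] at hx
            exact h2 hx.1.symm
    · cases na with
      | nil =>
        constructor
        · intro hx; exfalso
          rcases hsp : pvSp nd' with _ | ⟨x, xs⟩
          · exact absurd hsp (pvSp_ne_nil nd')
          · simp [pvSp, h, hsp] at hx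
        · intro hx; exfalso
          have := hx.length_le
          simp at this
      | cons c2 rest =>
        by_cases h2 : c2 = '_'
        · subst h2
          constructor
          · intro hx; exfalso
            rcases hsp : pvSp nd' with _ | ⟨x, xs⟩
            · exact absurd hsp (pvSp_ne_nil nd')
            · simp [pvSp, h, hsp] at hx
          · intro hx; exfalso
            rw [List.cons_append, List.cons_append, List.cons_prefix_cons] at hx
            exact h hx.1
        · rcases hd : pvSp nd' with _ | ⟨x, xs⟩
          · exact absurd hd (pvSp_ne_nil nd')
          · rcases ha : pvSp rest with _ | ⟨y, ys⟩
            · exact absurd ha (pvSp_ne_nil rest)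
            · have ihr := ih rest
              rw [hd, ha] at ihr
              simp only [pvSp, h, h2, if_false, hd, ha, List.headI, List.tail,
                List.cons_append, List.cons_prefix_cons, List.length_cons,
                List.take_succ_cons, List.cons.injEq] at *
              constructor
              · rintro ⟨⟨hc, hx⟩, ht⟩
                exact ⟨hc.symm, ihr.mp (by simp [hx, ht])⟩
              · rintro ⟨hc, hp⟩
                have := ihr.mpr hp
                simp at this
                exact ⟨⟨hc.symm, this.1⟩, this.2⟩

lemma pvSingleton_prefix (a : Char) (l : List Char) : [a] <+: l ↔ l.head? = some a := by
  cases l with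
  | nil => simp
  | cons b t => simp [List.cons_prefix_cons, eq_comm]

-- the sentinel string carries '_' exactly first at the takeWhile length
lemma pvTw_getElem (nd : List Char) :
    (nd ++ ['_'])[(nd.takeWhile (fun c => c != '_')).length]? = some '_' ∧
    ∀ j < (nd.takeWhile (fun c => c != '_')).length, (nd ++ ['_'])[j]? ≠ some '_' := by
  induction nd with
  | nil => simp
  | cons c r ih =>
    by_cases h : c = '_'
    · subst h; simp
    · simp only [List.takeWhile_cons, bne_iff_ne, ne_eq, h, not_false_eq_true,
        if_true, List.length_cons, List.cons_append]
      constructor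
      · simpa using ih.1
      · intro j hj
        cases j with
        | zero => simp [h]
        | succ m => simpa using ih.2 m (by omega)

-- find on the sentinel string points at the end of the first component
lemma pvFind_sentinel (nd : List Char) :
    PySem.Chars.find (nd ++ ['_']) ['_'] = ((nd.takeWhile (fun c => c != '_')).length : Int) := by
  have hinf : ['_'] <:+: (nd ++ ['_']) := ⟨nd, [], by simp⟩
  have hnn : 0 ≤ PySem.Chars.find (nd ++ ['_']) ['_'] :=
    (PySem.Chars.find_nonneg_iff _ _).mpr hinf
  obtain ⟨hpre, hmin⟩ := PySem.Chars.find_spec hnn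
  obtain ⟨hat, hbefore⟩ := pvTw_getElem nd
  have h1 : ¬ ((nd.takeWhile (fun c => c != '_')).length
      < (PySem.Chars.find (nd ++ ['_']) ['_']).toNat) := fun hlt =>
    hmin _ hlt ((pvSingleton_prefix _ _).mpr (by rw [List.head?_drop]; exact hat))
  have h2 : ¬ ((PySem.Chars.find (nd ++ ['_']) ['_']).toNat
      < (nd.takeWhile (fun c => c != '_')).length) := fun hlt =>
    hbefore _ hlt (by rw [← List.head?_drop]; exact (pvSingleton_prefix _ _).mp hpre)
  omega

-- slicing to find+1 yields the first component plus its delimiter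
lemma pvTake_tw (nd : List Char) :
    List.take ((nd.takeWhile (fun c => c != '_')).length + 1) (nd ++ ['_'])
      = nd.takeWhile (fun c => c != '_') ++ ['_'] := by
  induction nd with
  | nil => simp
  | cons c r ih =>
    by_cases h : c = '_'
    · subst h; simp
    · simp [h, ih]

-- the 1-test: matching first components iff the sentinel-terminated first token is a prefix
lemma pvTok_prefix_iff (t na : List Char) (ht : ∀ c ∈ t, c ≠ '_') :
    (t ++ ['_']) <+: (na ++ ['_']) ↔ na.takeWhile (fun c => c != '_') = t := by
  induction t generalizing na with
  | nil =>
    cases na with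
    | nil => simp
    | cons c2 rest =>
      by_cases h2 : c2 = '_'
      · subst h2; simp [List.cons_prefix_cons]
      · simp [List.cons_prefix_cons, h2, Ne.symm h2]
  | cons c t' ih =>
    have hc : c ≠ '_' := ht c (by simp)
    cases na with
    | nil =>
      simp [List.cons_prefix_cons, hc]
    | cons c2 rest =>
      rw [List.cons_append, List.cons_append, List.cons_prefix_cons, List.takeWhile_cons]
      by_cases h2 : c2 = c
      · subst h2
        simp [hc, ih rest (fun x hx => ht x (by simp [hx]))]
      · constructor
        · rintro ⟨h', _⟩; exact absurd h'.symm h2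
        · intro hx
          by_cases h3 : (c2 != '_') = true
          · rw [if_pos h3] at hx
            exact absurd (List.head_eq_of_cons_eq hx) h2
          · rw [if_neg h3] at hx
            exact absurd hx.symm (by simp)

-- first element of the split as an Option
lemma pvSp_head? (l : List Char) :
    (pvSp l).head? = some (l.takeWhile (fun c => c != '_')) := by
  rcases h : pvSp l with _ | ⟨x, xs⟩
  · exact absurd h (pvSp_ne_nil l)
  · have hh := pvSp_headI l
    rw [h] at hh
    simp at hh
    simp [hh]

-- the whole if-chains agree, on the normalized character lists
lemma pvMainKey (nd na : List Char) :
    (if pvCountLoop (pvSp nd) (pvSp na) == (pvSp nd).length then (2 : Int)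
     else if pvCountLoop (pvSp nd) (pvSp na) != 0 then 1 else 0)
    = (if PySem.Chars.startswith (na ++ ['_']) (nd ++ ['_']) then 2
       else if PySem.Chars.startswith (na ++ ['_'])
           (PySem.Chars.slice (nd ++ ['_']) none
             (some (PySem.Chars.find (nd ++ ['_']) ['_'] + 1))) then 1 else 0) := by
  rw [pvKey]
  have hs : PySem.Chars.slice (nd ++ ['_']) none
      (some (PySem.Chars.find (nd ++ ['_']) ['_'] + 1))
      = nd.takeWhile (fun c => c != '_') ++ ['_'] := by
    rw [pvFind_sentinel]
    have hc : ((nd.takeWhile (fun c => c != '_')).length : Int) + 1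
        = (((nd.takeWhile (fun c => c != '_')).length + 1 : Nat) : Int) := by push_cast; ring
    rw [hc, PySem.Chars.slice_eq_listSlice, PySem.List.slice_to_natCast, pvTake_tw]
  rw [hs]
  have e2 : (List.take (pvSp nd).length (pvSp na) == pvSp nd)
      = PySem.Chars.startswith (na ++ ['_']) (nd ++ ['_']) := by
    by_cases hp : (nd ++ ['_']) <+: (na ++ ['_'])
    · simp [(pvTake_sp_iff nd na).mpr hp, PySem.Chars.startswith_iff, hp]
    · have hne : List.take (pvSp nd).length (pvSp na) ≠ pvSp nd :=
        fun h => hp ((pvTake_sp_iff nd na).mp h)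
      rw [Bool.eq_iff_iff]
      simp [PySem.Chars.startswith_iff, hp, hne]
  have hfree : ∀ c ∈ nd.takeWhile (fun c => c != '_'), c ≠ '_' :=
    fun c hc => by simpa using List.mem_takeWhile_imp hc
  have hiff := pvTok_prefix_iff _ na hfree
  have e1 : ((pvSp nd).head? == (pvSp na).head?)
      = PySem.Chars.startswith (na ++ ['_']) (nd.takeWhile (fun c => c != '_') ++ ['_']) := by
    rw [pvSp_head? nd, pvSp_head? na]
    by_cases hp : na.takeWhile (fun c => c != '_') = nd.takeWhile (fun c => c != '_')
    · simp [hp, PySem.Chars.startswith_iff, hiff.mpr hp]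
    · have : ¬ (nd.takeWhile (fun c => c != '_') ++ ['_']) <+: (na ++ ['_']) :=
        fun h => hp (hiff.mp h)
      have hne : nd.takeWhile (fun c => c != '_') ≠ na.takeWhile (fun c => c != '_') :=
        fun h => hp h.symm
      rw [Bool.eq_iff_iff]
      simp [hne, PySem.Chars.startswith_iff, this]
  rw [e2, e1]

-- ===== VERDICT (by name: the statement is the Claim_ definition above) =====
theorem matchLanguage_py_spec : Claim_equal_matchLanguage_py := by
  intro desired actual _
  unfold Spec_matchLanguage_py matchLanguage_py matchLanguage_py_alt
  by_cases h1 : desired == actual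
  · simp [h1]
  · by_cases h2 : (desired == "" || actual == "") = true
    · simp [h1, h2]
    · simp only [h1, h2, if_false, Bool.false_eq_true]
      have := pvMainKey (pvNormCore desired) (pvNormCore actual)
      simpa [pvNorm, pvNormS, pvSplitOn_eq] using this
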